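-- pv_equiv track=rewrite | github.com/NITHYASREESIGAMANI/SHL-AI-PROJECT | app/main.py | is_invalid_query
-- ===== SOURCE A (Python) =====
-- def is_invalid_query(text: str):
--
--     invalid_keywords = [
--         "movie",
--         "song",
--         "weather",
--         "cricket",
--         "food",
--         "recipe",
--         "joke"
--     ]
--
--     return any(word in text.lower() for word in invalid_keywords)
-- ===== SOURCE B (Python) =====
-- _KEYWORDS = ("movie", "song", "weather", "cricket", "food", "recipe", "joke")
--
-- def is_invalid_query(text: str):
--     # lowercase once, then a single left-to-right scan: at each position,
--     # check whether some keyword starts there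
--     t = text.lower()
--     for i in range(len(t)):
--         if any(t.startswith(k, i) for k in _KEYWORDS):
--             return True
--     return False
-- ===== Notes on version B (the rewrite author's own statement) =====
-- stated objective: alternative
-- what changed: Replaces seven independent full-substring membership passes (one per keyword) with a single left-to-right scan over the lowercased text that tests all keywords as prefixes at each position, lowercasing exactly once.
import Mathlib
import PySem

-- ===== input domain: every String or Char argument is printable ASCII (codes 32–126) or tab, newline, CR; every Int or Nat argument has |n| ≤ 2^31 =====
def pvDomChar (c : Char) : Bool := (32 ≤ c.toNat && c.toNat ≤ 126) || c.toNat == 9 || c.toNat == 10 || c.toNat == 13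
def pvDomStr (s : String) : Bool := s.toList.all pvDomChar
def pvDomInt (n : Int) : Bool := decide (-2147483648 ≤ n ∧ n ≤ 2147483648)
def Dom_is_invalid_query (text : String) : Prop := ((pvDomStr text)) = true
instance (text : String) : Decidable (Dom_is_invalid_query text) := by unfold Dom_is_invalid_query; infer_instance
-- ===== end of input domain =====

-- B replaces seven independent substring-membership passes by one left-to-right
-- scan of the lowercased text testing all keywords as prefixes at each position
-- (objective: alternative traversal, same cost class).

-- ===== PORT A =====
def pvKeywords : List String :=
  ["movie", "song", "weather", "cricket", "food", "recipe", "joke"]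

-- any(word in text.lower() for word in invalid_keywords)
def is_invalid_query (text : String) : Bool :=
  pvKeywords.any (fun word => PySem.Str.isIn word (PySem.Str.lower text))

-- ===== PORT B =====
def pvKeywordChars : List (List Char) :=
  ["movie".toList, "song".toList, "weather".toList, "cricket".toList,
   "food".toList, "recipe".toList, "joke".toList]

-- the scan loop of Source B: for each position (suffix), does some keyword start here
def pvScan (t : List Char) : Bool :=
  match t with
  | [] => false
  | c :: rest => pvKeywordChars.any (fun k => List.isPrefixOf k (c :: rest)) || pvScan rest

def is_invalid_query_alt (text : String) : Bool :=
  pvScan (PySem.Chars.lower text.toList)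

-- ===== PRECONDITION & SPEC =====
def Spec_is_invalid_query (text : String) (out : Bool) : Prop := out = is_invalid_query_alt text
instance (text : String) (out : Bool) : Decidable (Spec_is_invalid_query text out) := by unfold Spec_is_invalid_query; infer_instance

-- ===== CLAIM (what is proved, stated in full; the proofs are below) =====
def Claim_equal_is_invalid_query : Prop := ∀ (text : String), Dom_is_invalid_query text → Spec_is_invalid_query text (is_invalid_query text)

-- ===== LEMMAS AND PROOFS =====

-- the scan finds exactly the infix occurrences of some keyword
theorem pvScan_eq_infix (t : List Char) :
    pvScan t = pvKeywordChars.any (fun k => decide (k <:+: t)) := by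
  induction t with
  | nil =>
    simp [pvScan, pvKeywordChars]
  | cons c rest ih =>
    rw [pvScan, ih]
    rw [Bool.eq_iff_iff]
    simp only [Bool.or_eq_true, List.any_eq_true,
      List.isPrefixOf_iff_prefix, decide_eq_true_eq, List.infix_cons_iff]
    constructor
    · rintro (⟨k, hk, h⟩ | ⟨k, hk, h⟩) <;> exact ⟨k, hk, by tauto⟩
    · rintro ⟨k, hk, h | h⟩
      · exact Or.inl ⟨k, hk, h⟩
      · exact Or.inr ⟨k, hk, h⟩

-- ===== VERDICT (by name: the statement is the Claim_ definition above) =====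
theorem is_invalid_query_spec : Claim_equal_is_invalid_query := by
  intro text _
  unfold Spec_is_invalid_query is_invalid_query is_invalid_query_alt
  rw [pvScan_eq_infix]
  simp only [pvKeywords, pvKeywordChars, List.any_cons, List.any_nil]
  rw [Bool.eq_iff_iff]
  simp only [Bool.or_eq_true, decide_eq_true_eq, PySem.Str.isIn_iff_infix, PySem.Str.toList_lower]
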